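-- pv_equiv track=rewrite | github.com/pypi-data/pypi-mirror-16 | packages/ofpstr/ofpstr-0.2.0.tar.gz/ofpstr-0.2.0/ofpstr/util.py | parse_func
-- ===== SOURCE A (Python) =====
-- pars = dict(("()", "{}", "[]", "<>"))
--
-- def scan_paren(end):
-- 	def scan(reader):
-- 		'''
-- 		reader is iterator that yields a char
-- 		@returns payload, right-parenthesis
-- 		'''
-- 		payload = ""
-- 		for c in reader:
-- 			if c == end:
-- 				return payload, c
-- 			else:
-- 				payload += c
-- 				if c in pars:
-- 					p,r = scan_paren(pars[c])(reader)
-- 					payload += p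
-- 					if r:
-- 						payload += r
-- 		return payload, ""
-- 	return scan
--
-- def parse_func(nojunk):
-- 	'''
-- 	parses argument is function-style string or not.
-- 	This checks argument is cleanly closed with parenthesis
-- 	'''
-- 	name = ""
-- 	reader = iter(nojunk)
-- 	for c in reader:
-- 		if c in pars:
-- 			p, r = scan_paren(pars[c])(reader)
-- 			assert len(nojunk) == len(name)+1+len(p)+len(r)
-- 			# cleanly closed only if len(r)!=0, should we raise warn here?
-- 			return name, p
-- 		else:
-- 			name += c
--
-- 	return name, None
-- ===== SOURCE B (Python) =====
-- def parse_func(nojunk):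
-- 	'''
-- 	parses argument is function-style string or not.
-- 	This checks argument is cleanly closed with parenthesis
-- 	'''
-- 	pars = {"(": ")", "{": "}", "[": "]", "<": ">"}
-- 	for i, c in enumerate(nojunk):
-- 		if c in pars:
-- 			break
-- 	else:
-- 		return nojunk, None
-- 	name = nojunk[:i]
-- 	stack = [pars[c]]
-- 	chunks = []
-- 	r = ""
-- 	for c in nojunk[i+1:]:
-- 		if c == stack[-1]:
-- 			stack.pop()
-- 			if not stack:
-- 				r = c
-- 				break
-- 			chunks.append(c)
-- 		elif c in pars:
-- 			chunks.append(c)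
-- 			stack.append(pars[c])
-- 		else:
-- 			chunks.append(c)
-- 	payload = "".join(chunks)
-- 	assert len(nojunk) == len(name) + 1 + len(payload) + len(r)
-- 	return name, payload
-- ===== Notes on version B (the rewrite author's own statement) =====
-- stated objective: alternative
-- what changed: Replaces A's mutually recursive scan_paren closures (one nested generator-consuming call per bracket level) with a single iterative scan keeping an explicit stack of expected closing characters, collecting payload chunks and joining once; the same AssertionError fires on trailing characters after the top-level close.
import Mathlib
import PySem

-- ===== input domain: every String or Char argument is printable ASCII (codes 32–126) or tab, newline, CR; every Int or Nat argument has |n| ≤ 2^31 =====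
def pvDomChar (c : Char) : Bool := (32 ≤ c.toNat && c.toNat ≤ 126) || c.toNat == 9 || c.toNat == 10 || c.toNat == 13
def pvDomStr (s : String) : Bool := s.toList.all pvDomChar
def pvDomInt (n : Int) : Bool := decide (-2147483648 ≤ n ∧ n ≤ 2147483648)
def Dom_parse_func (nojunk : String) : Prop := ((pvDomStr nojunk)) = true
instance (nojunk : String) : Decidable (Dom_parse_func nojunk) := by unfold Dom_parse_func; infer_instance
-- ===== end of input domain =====

-- B replaces A's mutual recursion (scan_paren closures re-entered per nesting level) by a single
-- scan with an explicit stack of expected closers; objective: alternative (same cost, no recursion).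

-- shared table: the four opening chars and the closer each maps to (Python's `pars` dict)
def isOpen (c : Char) : Bool := c == '(' || c == '{' || c == '[' || c == '<'
def closeOf (c : Char) : Char :=
  if c == '(' then ')' else if c == '{' then '}' else if c == '[' then ']' else '>'

-- ===== PORT A =====
-- scan_paren end (reader): recursion over the remaining chars, with fuel = length of the reader
-- (each recursive call consumes at least one char, so `cs.length` fuel is always enough).
-- returns (payload, right-paren, rest of reader)
def scanA (fuel : Nat) (e : Char) (cs : List Char) : List Char × List Char × List Char :=
  match fuel, cs with
  | 0, cs => ([], [], cs)          -- never reached with fuel ≥ cs.length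
  | _ + 1, [] => ([], [], [])
  | n + 1, c :: rest =>
      if c == e then ([], [c], rest)
      else if isOpen c then
        -- payload += c; recurse; payload += p; if r: payload += r; then the for-loop continues
        let t1 := scanA n (closeOf c) rest
        let t2 := scanA n e t1.2.2
        (c :: (t1.1 ++ t1.2.1 ++ t2.1), t2.2.1, t2.2.2)
      else
        let t := scanA n e rest
        (c :: t.1, t.2.1, t.2.2)

-- the name loop of parse_func (the assert is a no-op where it passes; inputs where it raises
-- are excluded by Pre_parse_func below)
def nameA (acc : List Char) (cs : List Char) : String × Option String :=
  match cs with
  | [] => (String.mk acc, none)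
  | c :: rest =>
      if isOpen c then
        (String.mk acc, some (String.mk (scanA rest.length (closeOf c) rest).1))
      else nameA (acc ++ [c]) rest

def parse_func (nojunk : String) : String × Option String := nameA [] nojunk.toList

-- ===== PORT B =====
-- one loop over the reader with an explicit stack of expected closers (tops at the head);
-- returns (payload, right-paren)
def scanB (stk : List Char) (acc : List Char) (cs : List Char) : List Char × List Char :=
  match stk, cs with
  | _, [] => (acc, [])
  | [], _ => (acc, [])             -- never reached: the loop stops when the stack empties
  | t :: stk', c :: rest =>
      if c == t then
        if stk'.isEmpty then (acc, [c])
        else scanB stk' (acc ++ [c]) rest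
      else if isOpen c then scanB (closeOf c :: t :: stk') (acc ++ [c]) rest
      else scanB (t :: stk') (acc ++ [c]) rest

def nameB (acc : List Char) (cs : List Char) : String × Option String :=
  match cs with
  | [] => (String.mk acc, none)
  | c :: rest =>
      if isOpen c then
        (String.mk acc, some (String.mk (scanB [closeOf c] [] rest).1))
      else nameB (acc ++ [c]) rest

def parse_func_alt (nojunk : String) : String × Option String := nameB [] nojunk.toList

-- ===== PRECONDITION & SPEC =====
-- Helper for Pre_: standard bracket matching on the input string — the index of the closer that
-- matches the first opener (none if it never closes).  This is a shape condition on the input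
-- (where its first bracket group ends); it computes neither port's output (no name, no payload).
def closeIdx (stk : List Char) (cs : List Char) (i : Nat) : Option Nat :=
  match stk, cs with
  | _, [] => none
  | [], _ => none
  | t :: stk', c :: rest =>
      if c == t then (if stk'.isEmpty then some i else closeIdx stk' rest (i + 1))
      else if isOpen c then closeIdx (closeOf c :: t :: stk') rest (i + 1)
      else closeIdx (t :: stk') rest (i + 1)

def preOK (cs : List Char) : Bool :=
  match cs with
  | [] => true
  | c :: rest =>
      if isOpen c then
        match closeIdx [closeOf c] rest 0 with
        | none => true
        | some i => i + 1 == rest.length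
      else preOK rest

-- Pre_ excludes exactly the inputs where both Pythons raise AssertionError: a first bracket group
-- that closes strictly before the end of the string (trailing characters after the top-level close).
def Pre_parse_func (nojunk : String) : Prop := preOK nojunk.toList = true
instance (nojunk : String) : Decidable (Pre_parse_func nojunk) := by unfold Pre_parse_func; infer_instance

def pvWitness_parse_func : String := "f(a<b>c)"

def Spec_parse_func (nojunk : String) (out : String × Option String) : Prop := out = parse_func_alt nojunk
instance (nojunk : String) (out : String × Option String) : Decidable (Spec_parse_func nojunk out) := by unfold Spec_parse_func; infer_instance

-- ===== CLAIM (what is proved, stated in full; the proofs are below) =====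
def Claim_equal_parse_func : Prop := ∀ (nojunk : String), Dom_parse_func nojunk → Pre_parse_func nojunk → Spec_parse_func nojunk (parse_func nojunk)

-- ===== LEMMAS AND PROOFS =====

theorem scanA_nil (fuel : Nat) (e : Char) : scanA fuel e [] = ([], [], []) := by
  cases fuel <;> rfl

-- scanA consumes chars: the leftover reader is never longer than the input
theorem scanA_rest_le (fuel : Nat) (e : Char) (cs : List Char) :
    (scanA fuel e cs).2.2.length ≤ cs.length := by
  induction fuel generalizing e cs with
  | zero => simp [scanA]
  | succ n ih =>
    cases cs with
    | nil => simp [scanA]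
    | cons c rest =>
      by_cases h1 : (c == e) = true
      · simp [scanA, h1]
      · by_cases h2 : isOpen c = true
        · have h3 := ih (closeOf c) rest
          have h4 := ih e (scanA n (closeOf c) rest).2.2
          simp [scanA, h1, h2]
          omega
        · have h4 := ih e rest
          simp [scanA, h1, h2]
          omega

-- with enough fuel, an empty right-paren result means the reader was exhausted
theorem scanA_empty_r (fuel : Nat) (e : Char) (cs : List Char) (h : cs.length ≤ fuel)
    (hr : (scanA fuel e cs).2.1 = []) : (scanA fuel e cs).2.2 = [] := by
  induction fuel generalizing e cs with
  | zero =>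
    cases cs with
    | nil => simp [scanA]
    | cons c rest => simp at h
  | succ n ih =>
    cases cs with
    | nil => simp [scanA]
    | cons c rest =>
      simp only [List.length_cons] at h
      by_cases h1 : (c == e) = true
      · simp [scanA, h1] at hr
      · by_cases h2 : isOpen c = true
        · simp only [scanA, h1, h2, if_true] at hr ⊢
          have hle : (scanA n (closeOf c) rest).2.2.length ≤ rest.length := scanA_rest_le ..
          exact ih e _ (by omega) hr
        · simp only [scanA, h1, h2] at hr ⊢
          exact ih e rest (by omega) hr

-- main correspondence: the explicit-stack scan equals the recursive scan followed by resuming the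
-- pending levels (the stack) on the leftover reader
theorem scanB_eq_scanA (fuel : Nat) (cs : List Char) (h : cs.length ≤ fuel)
    (e : Char) (stk acc : List Char) :
    scanB (e :: stk) acc cs =
      (if (scanA fuel e cs).2.1 = [] then (acc ++ (scanA fuel e cs).1, [])
       else if stk = [] then (acc ++ (scanA fuel e cs).1, (scanA fuel e cs).2.1)
       else scanB stk (acc ++ (scanA fuel e cs).1 ++ (scanA fuel e cs).2.1) (scanA fuel e cs).2.2) := by
  induction fuel generalizing cs e stk acc with
  | zero =>
    cases cs with
    | nil => simp [scanA, scanB]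
    | cons c rest => simp at h
  | succ n ih =>
    cases cs with
    | nil => simp [scanA, scanB]
    | cons c rest =>
      simp only [List.length_cons] at h
      by_cases h1 : (c == e) = true
      · -- top-level close of this level
        cases stk with
        | nil => simp [scanA, scanB, h1]
        | cons t stk' => simp [scanA, scanB, h1]
      · by_cases h2 : isOpen c = true
        · -- opener: push on the stack / recurse in A
          have hLHS : scanB (e :: stk) acc (c :: rest) =
              scanB (closeOf c :: e :: stk) (acc ++ [c]) rest := by
            simp [scanB, h1, h2]
          rw [hLHS, ih rest (by omega) (closeOf c) (e :: stk) (acc ++ [c])]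
          by_cases hr1 : (scanA n (closeOf c) rest).2.1 = []
          · -- inner scan exhausted the reader
            have hrest : (scanA n (closeOf c) rest).2.2 = [] :=
              scanA_empty_r n (closeOf c) rest (by omega) hr1
            simp [scanA, h1, h2, hr1, hrest, scanA_nil]
          · have hle : (scanA n (closeOf c) rest).2.2.length ≤ rest.length := scanA_rest_le ..
            simp only [hr1, if_false, if_neg (List.cons_ne_nil e stk)]
            rw [ih (scanA n (closeOf c) rest).2.2 (by omega) e stk
                  (acc ++ [c] ++ (scanA n (closeOf c) rest).1 ++ (scanA n (closeOf c) rest).2.1)]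
            by_cases hr2 : (scanA n e (scanA n (closeOf c) rest).2.2).2.1 = []
            · simp [scanA, h1, h2, hr2]
            · cases stk with
              | nil => simp [scanA, h1, h2, hr2]
              | cons t stk' => simp [scanA, h1, h2, hr2]
        · -- ordinary char
          have hLHS : scanB (e :: stk) acc (c :: rest) =
              scanB (e :: stk) (acc ++ [c]) rest := by
            simp [scanB, h1, h2]
          rw [hLHS, ih rest (by omega) e stk (acc ++ [c])]
          by_cases hr2 : (scanA n e rest).2.1 = []
          · simp [scanA, h1, h2, hr2]
          · cases stk with
            | nil => simp [scanA, h1, h2, hr2]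
            | cons t stk' => simp [scanA, h1, h2, hr2]

-- the two name loops agree
theorem nameA_eq_nameB (cs acc : List Char) : nameA acc cs = nameB acc cs := by
  induction cs generalizing acc with
  | nil => rfl
  | cons c rest ih =>
    by_cases h1 : isOpen c = true
    · simp only [nameA, nameB, h1, if_true]
      rw [scanB_eq_scanA rest.length rest le_rfl (closeOf c) [] []]
      by_cases hr : (scanA rest.length (closeOf c) rest).2.1 = [] <;> simp [hr]
    · simp only [nameA, nameB, h1]
      exact ih (acc ++ [c])

-- ===== VERDICT (by name: the statement is the Claim_ definition above) =====
theorem parse_func_spec : Claim_equal_parse_func := by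
  intro nojunk _ _
  unfold Spec_parse_func parse_func parse_func_alt
  exact nameA_eq_nameB _ _
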